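-- pv_equiv track=rewrite | github.com/HagglesworthMD/Transfer-Operations-Centre | distributor.py | classify_sender_domain
-- ===== SOURCE A (Python) =====
-- def classify_sender_domain(domain, policy):
--     """
--     Classify sender domain based on policy.
--
--     Returns: external_image_request | system_notification | internal | hold | unknown
--     """
--     if not domain:
--         return "unknown"
--
--     domain_lower = domain.lower().strip()
--
--     # Check external image request domains (Class 1)
--     external_image_domains = [d.lower().strip() for d in policy.get("external_image_request_domains", [])]
--     if domain_lower in external_image_domains:
--         return "external_image_request"
--
--     # Check system notification domains (Class 3)
--     system_notification_domains = [d.lower().strip() for d in policy.get("system_notification_domains", [])]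
--     if domain_lower in system_notification_domains:
--         return "system_notification"
--
--     # Check internal domains
--     internal_domains = [d.lower().strip() for d in policy.get("internal_domains", [])]
--     if domain_lower in internal_domains:
--         return "internal"
--
--     # Check always hold domains
--     hold_domains = [d.lower().strip() for d in policy.get("always_hold_domains", [])]
--     if domain_lower in hold_domains:
--         return "hold"
--
--     # Unknown domain
--     return "unknown"
-- ===== SOURCE B (Python) =====
-- def classify_sender_domain(domain, policy):
--     """Single lookup table built in priority order instead of four sequential scans."""
--     if not domain:
--         return "unknown"
--     lookup = {}
--     for field, label in (
--         ("external_image_request_domains", "external_image_request"),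
--         ("system_notification_domains", "system_notification"),
--         ("internal_domains", "internal"),
--         ("always_hold_domains", "hold"),
--     ):
--         for d in policy.get(field, []):
--             lookup.setdefault(d.lower().strip(), label)
--     return lookup.get(domain.lower().strip(), "unknown")
-- ===== Notes on version B (the rewrite author's own statement) =====
-- stated objective: idiomatic
-- what changed: Replaces four ordered membership scans (each building a normalized list and testing 'in') with one pass that builds a single normalized->label dict via setdefault in priority order, followed by one .get lookup.
import Mathlib
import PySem

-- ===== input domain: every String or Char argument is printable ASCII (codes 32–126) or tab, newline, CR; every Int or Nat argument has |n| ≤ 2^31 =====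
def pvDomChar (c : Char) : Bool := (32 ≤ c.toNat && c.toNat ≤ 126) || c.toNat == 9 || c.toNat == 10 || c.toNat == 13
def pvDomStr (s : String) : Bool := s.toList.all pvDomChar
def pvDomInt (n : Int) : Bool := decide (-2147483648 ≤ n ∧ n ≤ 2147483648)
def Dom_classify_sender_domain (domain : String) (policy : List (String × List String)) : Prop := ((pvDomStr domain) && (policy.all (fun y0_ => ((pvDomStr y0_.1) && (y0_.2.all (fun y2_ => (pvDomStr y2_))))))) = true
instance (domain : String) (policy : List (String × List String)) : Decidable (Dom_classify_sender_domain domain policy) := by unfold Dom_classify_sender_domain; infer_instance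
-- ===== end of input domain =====

-- B builds one normalized->label table in priority order (setdefault) and does a single lookup, instead of four sequential normalized scans; same return value.
-- ===== PORT A =====
def pvNorm (s : String) : String := PySem.Str.strip (PySem.Str.lower s)

def classify_sender_domain (domain : String) (policy : List (String × List String)) : String :=
  if domain == "" then "unknown"
  else
    let domain_lower := pvNorm domain
    let external_image_domains := ((PySem.Dict.mk policy).getD "external_image_request_domains" []).map pvNorm
    if external_image_domains.contains domain_lower then "external_image_request"
    else
      let system_notification_domains := ((PySem.Dict.mk policy).getD "system_notification_domains" []).map pvNorm
      if system_notification_domains.contains domain_lower then "system_notification"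
      else
        let internal_domains := ((PySem.Dict.mk policy).getD "internal_domains" []).map pvNorm
        if internal_domains.contains domain_lower then "internal"
        else
          let hold_domains := ((PySem.Dict.mk policy).getD "always_hold_domains" []).map pvNorm
          if hold_domains.contains domain_lower then "hold"
          else "unknown"

-- ===== PORT B =====
def pvBuildLookup (policy : List (String × List String)) : PySem.Dict String String :=
  [("external_image_request_domains", "external_image_request"),
   ("system_notification_domains", "system_notification"),
   ("internal_domains", "internal"),
   ("always_hold_domains", "hold")].foldl
    (fun acc p =>
      ((PySem.Dict.mk policy).getD p.1 []).foldl
        (fun a d => a.setdefault (pvNorm d) p.2) acc)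
    PySem.Dict.empty

def classify_sender_domain_alt (domain : String) (policy : List (String × List String)) : String :=
  if domain == "" then "unknown"
  else (pvBuildLookup policy).getD (pvNorm domain) "unknown"

-- ===== PRECONDITION & SPEC =====
def Spec_classify_sender_domain (domain : String) (policy : List (String × List String)) (out : String) : Prop := out = classify_sender_domain_alt domain policy
instance (domain : String) (policy : List (String × List String)) (out : String) : Decidable (Spec_classify_sender_domain domain policy out) := by unfold Spec_classify_sender_domain; infer_instance

-- ===== CLAIM (what is proved, stated in full; the proofs are below) =====
def Claim_equal_classify_sender_domain : Prop := ∀ (domain : String) (policy : List (String × List String)), Dom_classify_sender_domain domain policy → Spec_classify_sender_domain domain policy (classify_sender_domain domain policy)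

-- ===== LEMMAS AND PROOFS =====
lemma pv_get?_foldl_setdefault (entries : List String) (label : String)
    (acc : PySem.Dict String String) (k : String) :
    (entries.foldl (fun a d => a.setdefault (pvNorm d) label) acc).get? k
      = ((acc.get? k).or (if (entries.map pvNorm).contains k then some label else none)) := by
  induction entries generalizing acc with
  | nil => simp
  | cons d rest ih =>
    simp only [List.foldl_cons, ih, List.map_cons, List.contains_cons]
    by_cases h : k = pvNorm d
    · subst h
      rw [PySem.Dict.get?_setdefault_self]
      cases hk : acc.get? (pvNorm d) <;> simp
    · rw [PySem.Dict.get?_setdefault_of_ne (hne := h)]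
      simp [h]

lemma pv_lookup_get? (policy : List (String × List String)) (k : String) :
    (pvBuildLookup policy).get? k
      = (if (((PySem.Dict.mk policy).getD "external_image_request_domains" []).map pvNorm).contains k then some "external_image_request" else none).or
        ((if (((PySem.Dict.mk policy).getD "system_notification_domains" []).map pvNorm).contains k then some "system_notification" else none).or
        ((if (((PySem.Dict.mk policy).getD "internal_domains" []).map pvNorm).contains k then some "internal" else none).or
         (if (((PySem.Dict.mk policy).getD "always_hold_domains" []).map pvNorm).contains k then some "hold" else none))) := by
  simp only [pvBuildLookup, List.foldl_cons, List.foldl_nil]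
  rw [pv_get?_foldl_setdefault, pv_get?_foldl_setdefault, pv_get?_foldl_setdefault,
      pv_get?_foldl_setdefault]
  simp [Option.or_assoc]

theorem classify_sender_domain_spec : Claim_equal_classify_sender_domain := by
  intro domain policy _
  unfold Spec_classify_sender_domain
  unfold classify_sender_domain classify_sender_domain_alt
  by_cases hd : domain == ""
  · simp [hd]
  · simp only [hd, if_false, Bool.false_eq_true,
      PySem.Dict.getD_eq_get?_getD, pv_lookup_get?]
    split_ifs <;> simp
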